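-- pv_equiv track=rewrite | github.com/Dyeoue/DW_Companion_Rankings | lib/results.py | position
-- ===== SOURCE A (Python) =====
-- def position(choices, results, eliminated=[], place=1):
--     winners = {}
--     for choice in choices:
--         winners[choice] = 0
--     for vote in results:
--         vote = [i for i in sorted(vote.items(), key=lambda k: k[1]) if i[0] not in eliminated]
--         winners[vote[place - 1][0]] += 1
--     return sorted(winners.items(), key=lambda k: k[1], reverse=True)
-- ===== SOURCE B (Python) =====
-- def position(choices, results, eliminated=[], place=1):
--     tally = dict.fromkeys(choices, 0)
--     for vote in results:
--         pool = [kv for kv in vote.items() if kv[0] not in eliminated]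
--         chosen = None
--         for _ in range(place):
--             best = min(pool, key=lambda kv: kv[1])
--             pool.remove(best)
--             chosen = best[0]
--         tally[chosen] += 1
--     return sorted(tally.items(), key=lambda kv: kv[1], reverse=True)
-- ===== Notes on version B (the rewrite author's own statement) =====
-- stated objective: alternative
-- what changed: Each ballot's winner at the given rank is found by repeated first-minimum extraction (place rounds of min+remove) instead of fully sorting every ballot and indexing the sorted list.
-- outside the precondition, e.g. on position(['a', 'b'], [{'a': 1, 'b': 2}], [], 0): A returns [('b', 1), ('a', 0)], B raises KeyError; on position(['a'], [{'a': 1, 'b': 2}], [], 1): A returns [('a', 1)], B returns [('a', 1)]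
import Mathlib
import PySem

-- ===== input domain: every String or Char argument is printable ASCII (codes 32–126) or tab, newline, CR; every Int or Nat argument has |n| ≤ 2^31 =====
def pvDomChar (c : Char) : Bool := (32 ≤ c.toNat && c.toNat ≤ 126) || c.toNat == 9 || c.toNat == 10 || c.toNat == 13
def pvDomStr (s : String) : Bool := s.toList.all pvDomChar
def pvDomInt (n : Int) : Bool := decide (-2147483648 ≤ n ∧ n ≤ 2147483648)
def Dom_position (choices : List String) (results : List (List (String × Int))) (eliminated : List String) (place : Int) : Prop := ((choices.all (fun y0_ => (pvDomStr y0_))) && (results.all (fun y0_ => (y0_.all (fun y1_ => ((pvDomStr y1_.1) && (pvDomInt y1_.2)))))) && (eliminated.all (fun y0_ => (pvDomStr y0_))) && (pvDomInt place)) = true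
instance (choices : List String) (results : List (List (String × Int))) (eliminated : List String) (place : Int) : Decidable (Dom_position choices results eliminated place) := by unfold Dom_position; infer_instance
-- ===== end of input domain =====

-- B finds each ballot's rank-`place` choice by `place` rounds of first-minimum extraction instead of
-- fully sorting every ballot (objective: alternative algorithm); the proved equivalence is about return values.

-- ===== PORT A =====
-- one iteration of A's `for vote in results` loop; `none` = the Python raised (IndexError/KeyError)
def positionStep (eliminated : List String) (place : Int)
    (acc : Option (PySem.Dict String Int)) (vote : List (String × Int)) :
    Option (PySem.Dict String Int) :=
  acc.bind fun w =>
    let v := (PySem.List.sorted (PySem.Dict.ofList vote).items (fun i => i.2) false).filter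
               (fun i => !(eliminated.contains i.1))
    match PySem.List.pyGet? v (place - 1) with
    | none => none                          -- IndexError: vote[place - 1]
    | some sel =>
        if w.contains sel.1 then some (w.modify sel.1 0 (· + 1)) else none   -- KeyError: unknown choice

def position (choices : List String) (results : List (List (String × Int))) (eliminated : List String) (place : Int) : List (String × Int) :=
  let winners : PySem.Dict String Int := choices.foldl (fun d c => d.insert c 0) PySem.Dict.empty
  match results.foldl (positionStep eliminated place) (some winners) with
  | some w => PySem.List.sorted w.items (fun k => k.2) true
  | none => []                              -- unreachable under Pre_position (the Python raised)

-- ===== PORT B =====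
-- Source B's inner `for _ in range(place)` loop: repeatedly take the first minimum and remove it;
-- `none` = the Python raised (ValueError from min() on an empty pool, or KeyError on `chosen = None`)
def selectChosen : Nat → List (String × Int) → Option String → Option String
  | 0, _, chosen => chosen
  | n + 1, pool, _ =>
    match PySem.List.min? pool (fun kv => kv.2) with
    | none => none                          -- ValueError: min(()) on an empty pool
    | some best =>
        match PySem.List.remove? pool best with
        | none => none                      -- unreachable: best ∈ pool
        | some pool' => selectChosen n pool' (some best.1)

def altStep (eliminated : List String) (place : Int)
    (acc : Option (PySem.Dict String Int)) (vote : List (String × Int)) :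
    Option (PySem.Dict String Int) :=
  acc.bind fun t =>
    let pool := (PySem.Dict.ofList vote).items.filter (fun kv => !(eliminated.contains kv.1))
    match selectChosen place.toNat pool none with
    | none => none
    | some c => if t.contains c then some (t.modify c 0 (· + 1)) else none   -- KeyError: unknown choice

def position_alt (choices : List String) (results : List (List (String × Int))) (eliminated : List String) (place : Int) : List (String × Int) :=
  let tally : PySem.Dict String Int := PySem.Dict.mk ((PySem.List.dedup choices).map (fun c => (c, 0)))
  match results.foldl (altStep eliminated place) (some tally) with
  | some t => PySem.List.sorted t.items (fun kv => kv.2) true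
  | none => []

-- ===== PRECONDITION & SPEC =====
-- Pre_ excludes (a) place <= 0, where A's vote[place - 1] negative-index wraparound selects from the tail of the
-- ballot while B's round-based selection raises; (b) ballots whose non-eliminated part is shorter than place
-- (A raises IndexError) or mentions a choice outside `choices` (A raises KeyError whenever such a choice is
-- selected; requiring ALL non-eliminated ballot keys to be known is a slightly wider closed-form condition than
-- "the selected one is known", so it also excludes some inputs on which both programs agree).
def Pre_position (choices : List String) (results : List (List (String × Int))) (eliminated : List String) (place : Int) : Prop :=
  ∀ vote ∈ results,
    1 ≤ place ∧ place ≤ ((PySem.Dict.ofList vote).items.filter (fun kv => !(eliminated.contains kv.1))).length ∧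
    ∀ kv ∈ (PySem.Dict.ofList vote).items.filter (fun kv => !(eliminated.contains kv.1)), kv.1 ∈ choices
instance (choices : List String) (results : List (List (String × Int))) (eliminated : List String) (place : Int) : Decidable (Pre_position choices results eliminated place) := by unfold Pre_position; infer_instance

def pvWitness_position : List String × (List (List (String × Int))) × List String × Int :=
  (["a", "b", "c"], [[("a", 1), ("b", 2)], [("b", 1), ("a", 2), ("c", 3)]], ["c"], 1)

def Spec_position (choices : List String) (results : List (List (String × Int))) (eliminated : List String) (place : Int) (out : List (String × Int)) : Prop := out = position_alt choices results eliminated place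
instance (choices : List String) (results : List (List (String × Int))) (eliminated : List String) (place : Int) (out : List (String × Int)) : Decidable (Spec_position choices results eliminated place out) := by unfold Spec_position; infer_instance

-- ===== CLAIM (what is proved, stated in full; the proofs are below) =====
def Claim_equal_position : Prop := ∀ (choices : List String) (results : List (List (String × Int))) (eliminated : List String) (place : Int), Dom_position choices results eliminated place → Pre_position choices results eliminated place → Spec_position choices results eliminated place (position choices results eliminated place)

-- ===== LEMMAS AND PROOFS =====

theorem min?_snoc {α κ : Type} [LinearOrder κ] (ys : List α) (x : α) (key : α → κ) :
    PySem.List.min? (ys ++ [x]) key =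
      match PySem.List.min? ys key with
      | none => some x
      | some m => if key x < key m then some x else some m := by
  cases h : PySem.List.min? ys key with
  | none =>
      rw [PySem.List.min?_eq_none_iff] at h
      subst h; simp [PySem.List.min?]
  | some m =>
      unfold PySem.List.min? at h ⊢
      rw [List.foldl_append, h]
      simp [List.foldl]

theorem remove?_cons {α : Type} [BEq α] (y : α) (ys : List α) (v : α) :
    PySem.List.remove? (y :: ys) v =
      if y == v then some ys else (PySem.List.remove? ys v).map (y :: ·) := by
  simp only [PySem.List.remove?, List.idxOf?_cons]
  by_cases h : (y == v) = true
  · simp [h]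
  · simp only [h, Bool.false_eq_true, if_false]
    cases List.idxOf? v ys <;> simp

theorem remove?_snoc_self {α : Type} [BEq α] [LawfulBEq α] (ys : List α) (x : α) (h : x ∉ ys) :
    PySem.List.remove? (ys ++ [x]) x = some ys := by
  induction ys with
  | nil => simp [PySem.List.remove?]
  | cons y t ih =>
      simp only [List.mem_cons, not_or] at h
      have hy : (y == x) = false := by simpa using fun hh => h.1 hh.symm
      rw [List.cons_append, remove?_cons, hy]
      simp [ih h.2]

theorem remove?_snoc_of_mem {α : Type} [BEq α] [LawfulBEq α] (ys ys' : List α) (x v : α)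
    (h : PySem.List.remove? ys v = some ys') :
    PySem.List.remove? (ys ++ [x]) v = some (ys' ++ [x]) := by
  induction ys generalizing ys' with
  | nil => simp [PySem.List.remove?] at h
  | cons y t ih =>
      rw [remove?_cons] at h
      simp only [List.cons_append, remove?_cons]
      by_cases hy : (y == v) = true
      · simp [hy] at h ⊢; simp [← h]
      · simp only [hy, Bool.false_eq_true, if_false] at h ⊢
        cases ht : PySem.List.remove? t v with
        | none => simp [ht] at h
        | some t' =>
            simp [ht] at h
            rw [ih t' ht]
            simp [← h]

-- if x goes strictly before everything in l, insertBy prepends it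
theorem insertBy_of_forall_before {α : Type} (before : α → α → Bool) (x : α) (l : List α)
    (h : ∀ y ∈ l, before x y = true) :
    PySem.List.insertBy before x l = x :: l := by
  cases l with
  | nil => rfl
  | cons y ys => simp [PySem.List.insertBy, h y (by simp)]

theorem filter_insertBy_neg {α : Type} (before : α → α → Bool) (p : α → Bool) (x : α) (l : List α)
    (hx : p x = false) :
    (PySem.List.insertBy before x l).filter p = l.filter p := by
  induction l with
  | nil => simp [PySem.List.insertBy, hx]
  | cons y ys ih =>
      by_cases hb : before x y = true
      · simp [PySem.List.insertBy, hb, hx]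
      · simp only [PySem.List.insertBy, hb, Bool.false_eq_true, if_false]
        by_cases hy : p y = true <;> simp [hy, ih]

theorem filter_insertBy_pos {α κ : Type} [LinearOrder κ] (p : α → Bool) (x : α) (l : List α)
    (key : α → κ) (hl : l.Pairwise (fun a b => key a ≤ key b)) (hx : p x = true) :
    (PySem.List.insertBy (fun a b => decide (key a < key b)) x l).filter p =
      PySem.List.insertBy (fun a b => decide (key a < key b)) x (l.filter p) := by
  induction l with
  | nil => simp [PySem.List.insertBy, hx]
  | cons y ys ih =>
      have hys := (List.pairwise_cons.mp hl).2
      have hyall := (List.pairwise_cons.mp hl).1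
      by_cases hb : key x < key y
      · simp only [PySem.List.insertBy, hb, decide_true, if_true]
        by_cases hy : p y = true
        · simp [hx, hy, PySem.List.insertBy, hb]
        · simp only [List.filter_cons, hx, hy, Bool.false_eq_true, if_false, if_true]
          rw [insertBy_of_forall_before]
          intro z hz
          have : z ∈ ys := List.mem_of_mem_filter hz
          exact decide_eq_true (lt_of_lt_of_le hb (hyall z this))
      · simp only [PySem.List.insertBy, hb, decide_false, Bool.false_eq_true, if_false]
        by_cases hy : p y = true
        · simp only [List.filter_cons, hy, if_true]
          rw [ih hys]
          simp [PySem.List.insertBy, hb]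
        · simp only [List.filter_cons, hy, Bool.false_eq_true, if_false]
          exact ih hys

-- `sorted` of a snoc is one insertBy step on `sorted` of the front
theorem sorted_snoc {α κ : Type} [LinearOrder κ] (ys : List α) (x : α) (key : α → κ) :
    PySem.List.sorted (ys ++ [x]) key false =
      PySem.List.insertBy (fun a b => decide (key a < key b)) x (PySem.List.sorted ys key false) := by
  simp [PySem.List.sorted, List.foldl_append]

-- filtering commutes with a stable sort
theorem filter_sorted {α κ : Type} [LinearOrder κ] (p : α → Bool) (xs : List α) (key : α → κ) :
    (PySem.List.sorted xs key false).filter p = PySem.List.sorted (xs.filter p) key false := by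
  induction xs using List.reverseRecOn with
  | nil => rfl
  | append_singleton ys x ih =>
      rw [sorted_snoc, List.filter_append]
      by_cases hx : p x = true
      · rw [filter_insertBy_pos p x _ key (PySem.List.sorted_pairwise ys key) hx, ih]
        simp [hx, sorted_snoc]
      · rw [filter_insertBy_neg _ p x _ (by simpa using hx), ih]
        simp [hx]

-- HEAD/TAIL of a stable sort: the first minimum comes first, the rest is the sort of the pool
-- with that occurrence removed — exactly one of B's extraction rounds.
theorem sorted_head_tail {α κ : Type} [LinearOrder κ] [BEq α] [LawfulBEq α]
    (pool : List α) (key : α → κ) (h : pool ≠ []) :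
    ∃ best pool', PySem.List.min? pool key = some best ∧
      PySem.List.remove? pool best = some pool' ∧
      PySem.List.sorted pool key false = best :: PySem.List.sorted pool' key false := by
  induction pool using List.reverseRecOn with
  | nil => exact absurd rfl h
  | append_singleton ys x ih =>
      cases hys : ys with
      | nil =>
          refine ⟨x, [], ?_, ?_, ?_⟩ <;>
            simp [PySem.List.min?, PySem.List.remove?, PySem.List.sorted, PySem.List.insertBy]
      | cons y t =>
          rw [← hys]
          obtain ⟨m, ys', hmin, hrem, hsort⟩ := ih (by simp [hys])
          by_cases hb : key x < key m
          · have hxnot : x ∉ ys := by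
              intro hx
              exact absurd (PySem.List.min?_isMin hmin x hx) (not_le.mpr hb)
            refine ⟨x, ys, ?_, remove?_snoc_self ys x hxnot, ?_⟩
            · rw [min?_snoc, hmin]; simp [hb]
            · rw [sorted_snoc, insertBy_of_forall_before]
              intro z hz
              have hzys : z ∈ ys := (PySem.List.mem_sorted ys key false z).mp hz
              exact decide_eq_true (lt_of_lt_of_le hb (PySem.List.min?_isMin hmin z hzys))
          · refine ⟨m, ys' ++ [x], ?_, remove?_snoc_of_mem ys ys' x m hrem, ?_⟩
            · rw [min?_snoc, hmin]; simp [hb]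
            · rw [sorted_snoc, hsort]
              simp only [PySem.List.insertBy, decide_eq_true_eq, hb, if_false]
              rw [sorted_snoc]

-- B's selection loop computes the j-th (0-based) element of the stable sort of the pool
theorem selectChosen_eq_sorted (j : Nat) (pool : List (String × Int)) (c0 : Option String)
    (hj : j < pool.length) :
    selectChosen (j + 1) pool c0 =
      ((PySem.List.sorted pool (fun kv => kv.2) false)[j]?).map (·.1) := by
  induction j generalizing pool c0 with
  | zero =>
      obtain ⟨best, pool', hmin, hrem, hsort⟩ :=
        sorted_head_tail pool (fun kv => kv.2) (by intro h; simp [h] at hj)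
      simp [selectChosen, hmin, hrem, hsort]
  | succ j ih =>
      obtain ⟨best, pool', hmin, hrem, hsort⟩ :=
        sorted_head_tail pool (fun kv => kv.2) (by intro h; simp [h] at hj)
      have hlen : pool.length = pool'.length + 1 := by
        have := congrArg List.length hsort
        simpa [PySem.List.length_sorted] using this
      have hj' : j < pool'.length := by omega
      show (match PySem.List.min? pool (fun kv => kv.2) with
        | none => none
        | some best => match PySem.List.remove? pool best with
          | none => none
          | some pool' => selectChosen (j + 1) pool' (some best.1)) = _
      rw [hmin]
      simp only []
      rw [hrem, hsort]
      simp only [ih pool' (some best.1) hj', List.getElem?_cons_succ]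

theorem foldl_insert_zero (cs : List String) (s : List String) :
    cs.foldl (fun d c => d.insert c 0) (PySem.Dict.mk (s.map (fun c => (c, (0 : Int))))) =
      PySem.Dict.mk ((cs.foldl PySem.Set.add s).map (fun c => (c, (0 : Int)))) := by
  induction cs generalizing s with
  | nil => rfl
  | cons c cs ih =>
      have hstep : (PySem.Dict.mk (s.map (fun c => (c, (0 : Int))))).insert c 0 =
          PySem.Dict.mk ((PySem.Set.add s c).map (fun c => (c, (0 : Int)))) := by
        by_cases hc : s.contains c = true
        · have hmem : c ∈ s := by simpa using hc
          rw [PySem.Set.add_eq_ite, if_pos hmem]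
          simp only [PySem.Dict.insert]
          rw [if_pos]
          · congr 1
            rw [List.map_map]
            apply List.map_congr_left
            intro a _
            by_cases hac : (a == c) = true
            · simp_all
            · simp [Function.comp, hac]
          · simpa [PySem.Dict.contains] using hmem
        · have hmem : c ∉ s := by simpa using hc
          rw [PySem.Set.add_eq_ite, if_neg hmem]
          simp only [PySem.Dict.insert]
          rw [if_neg]
          · simp
          · simpa [PySem.Dict.contains] using hmem
      simp only [List.foldl_cons, hstep, ih]

-- the initial dicts of the two ports are equal
theorem init_dict_eq (choices : List String) :
    choices.foldl (fun d c => d.insert c 0) PySem.Dict.empty =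
      (PySem.Dict.mk ((PySem.List.dedup choices).map (fun c => (c, 0))) : PySem.Dict String Int) := by
  have := foldl_insert_zero choices []
  simpa [PySem.Dict.empty, PySem.List.dedup_eq_ofList, PySem.Set.ofList_eq_foldl] using this

theorem contains_init (choices : List String) (c : String) :
    ((PySem.Dict.mk ((PySem.List.dedup choices).map (fun c => (c, 0))) : PySem.Dict String Int)).contains c = true
      ↔ c ∈ choices := by
  simp [PySem.Dict.contains]

-- one loop iteration: both ports pick the same choice and update the same dict, keeping its key set
theorem step_eq (choices eliminated : List String) (place : Int) (vote : List (String × Int))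
    (w : PySem.Dict String Int) (hp : 1 ≤ place)
    (hlen : place ≤ ((PySem.Dict.ofList vote).items.filter (fun kv => !(eliminated.contains kv.1))).length)
    (hkeys : ∀ kv ∈ (PySem.Dict.ofList vote).items.filter (fun kv => !(eliminated.contains kv.1)), kv.1 ∈ choices)
    (hw : ∀ c, w.contains c = true ↔ c ∈ choices) :
    ∃ w', positionStep eliminated place (some w) vote = some w' ∧
      altStep eliminated place (some w) vote = some w' ∧
      ∀ c, w'.contains c = true ↔ c ∈ choices := by
  set pool := (PySem.Dict.ofList vote).items.filter (fun kv => !(eliminated.contains kv.1)) with hpool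
  have hj : (place - 1).toNat < pool.length := by omega
  have hplace : place - 1 = (((place - 1).toNat : Nat) : Int) := by omega
  have hjs : (place - 1).toNat < (PySem.List.sorted pool (fun kv => kv.2) false).length := by
    rw [PySem.List.length_sorted]; exact hj
  have hA : PySem.List.pyGet?
      ((PySem.List.sorted (PySem.Dict.ofList vote).items (fun i => i.2) false).filter
        (fun i => !(eliminated.contains i.1))) (place - 1) =
      some ((PySem.List.sorted pool (fun kv => kv.2) false)[(place - 1).toNat]'hjs) := by
    rw [filter_sorted, ← hpool]
    conv_lhs => rw [hplace]
    rw [PySem.List.pyGet?_natCast, List.getElem?_eq_getElem hjs]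
  have hB : selectChosen place.toNat pool none =
      some (((PySem.List.sorted pool (fun kv => kv.2) false)[(place - 1).toNat]'hjs).1) := by
    have hpn : place.toNat = (place - 1).toNat + 1 := by omega
    rw [hpn, selectChosen_eq_sorted _ pool none hj, List.getElem?_eq_getElem hjs]
    rfl
  set sel := (PySem.List.sorted pool (fun kv => kv.2) false)[(place - 1).toNat]'hjs with hsel
  have hselc : sel.1 ∈ choices := by
    apply hkeys
    exact (PySem.List.mem_sorted pool (fun kv => kv.2) false sel).mp (List.getElem_mem hjs)
  have hcont : w.contains sel.1 = true := (hw sel.1).mpr hselc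
  refine ⟨w.modify sel.1 0 (· + 1), ?_, ?_, ?_⟩
  · simp only [positionStep, Option.bind_some, hA, hcont, if_true]
  · simp only [altStep, Option.bind_some, ← hpool, hB, hcont, if_true]
  · intro c
    simp only [PySem.Dict.modify, PySem.Dict.contains_insert, Bool.or_eq_true, beq_iff_eq]
    constructor
    · rintro (rfl | hc)
      · exact hselc
      · exact (hw c).mp hc
    · intro hc
      exact Or.inr ((hw c).mpr hc)

theorem fold_eq (choices eliminated : List String) (place : Int)
    (results : List (List (String × Int)))
    (hres : ∀ vote ∈ results,
      1 ≤ place ∧ place ≤ ((PySem.Dict.ofList vote).items.filter (fun kv => !(eliminated.contains kv.1))).length ∧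
      ∀ kv ∈ (PySem.Dict.ofList vote).items.filter (fun kv => !(eliminated.contains kv.1)), kv.1 ∈ choices) :
    ∀ w : PySem.Dict String Int, (∀ c, w.contains c = true ↔ c ∈ choices) →
      results.foldl (positionStep eliminated place) (some w) =
        results.foldl (altStep eliminated place) (some w) := by
  induction results with
  | nil => intro w _; rfl
  | cons vote rest ih =>
      intro w hw
      obtain ⟨hp, hlen, hkeys⟩ := hres vote (by simp)
      obtain ⟨w', hA, hB, hw'⟩ := step_eq choices eliminated place vote w hp hlen hkeys hw
      simp only [List.foldl_cons, hA, hB]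
      exact ih (fun v hv => hres v (by simp [hv])) w' hw'

-- ===== VERDICT (by name: the statement is the Claim_ definition above) =====
theorem position_spec : Claim_equal_position := by
  intro choices results eliminated place _ hres
  show position choices results eliminated place = position_alt choices results eliminated place
  simp only [position, position_alt, init_dict_eq]
  rw [fold_eq choices eliminated place results hres _ (contains_init choices)]
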